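-- pv_equiv track=rewrite | github.com/krab0vsky/labs | l4/lab4.py | transform_number
-- ===== SOURCE A (Python) =====
-- inter = {
--     '1': 'один',
--     '3': 'три',
--     '5': 'пять',
--     '7': 'семь',
-- }
--
-- def transform_number(num):
--     dc = {}
--     trans = []
--     is_negative = num[0] == '-'
--     if is_negative:
--         num = num[1:]
--     for d in num:
--         if d in dc and d in inter:
--             trans.append(inter[d])
--         else:
--             trans.append(d)
--             dc[d] = 1
--     result = ''.join(trans)
--     if is_negative:
--         result = '-' + result
--     return result
-- ===== SOURCE B (Python) =====
-- inter = {
--     '1': 'один',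
--     '3': 'три',
--     '5': 'пять',
--     '7': 'семь',
-- }
--
-- def transform_number(num):
--     is_negative = num[0] == '-'
--     s = num[1:] if is_negative else num
--     for d, w in inter.items():
--         head, sep, rest = s.partition(d)
--         s = head + sep + rest.replace(d, w)
--     return '-' + s if is_negative else s
-- ===== Notes on version B (the rewrite author's own statement) =====
-- stated objective: simpler
-- what changed: Instead of a single character scan carrying a seen-dictionary, B makes one partition+replace pass per odd-digit key: partition keeps the first occurrence, replace rewrites every later one, which is A's order-of-appearance semantics.
import Mathlib
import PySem

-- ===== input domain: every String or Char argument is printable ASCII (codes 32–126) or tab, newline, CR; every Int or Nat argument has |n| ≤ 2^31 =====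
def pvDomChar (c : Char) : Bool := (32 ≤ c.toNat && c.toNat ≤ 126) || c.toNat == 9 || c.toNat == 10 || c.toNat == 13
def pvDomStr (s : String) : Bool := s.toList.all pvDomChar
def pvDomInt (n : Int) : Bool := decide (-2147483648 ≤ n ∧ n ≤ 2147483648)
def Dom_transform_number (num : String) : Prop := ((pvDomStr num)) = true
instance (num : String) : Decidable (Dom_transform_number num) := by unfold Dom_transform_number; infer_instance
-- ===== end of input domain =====

-- B replaces A's seen-dictionary character scan by one partition+replace pass per odd-digit key (simpler decomposition, same values).

-- the module-level dict `inter` (shared context of both functions)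
def inter : PySem.Dict Char (List Char) :=
  PySem.Dict.mk [('1', "один".toList), ('3', "три".toList), ('5', "пять".toList), ('7', "семь".toList)]

-- ===== PORT A =====
def transform_number (num : String) : String :=
  let cs := num.toList
  -- num[0] == '-' : Pre_ excludes "" where Python raises IndexError, so the default is never read
  let isNeg := PySem.List.pyGetD cs 0 ' ' == '-'
  let cs1 := if isNeg then PySem.List.slice cs (some 1) none else cs   -- num[1:]
  let st := cs1.foldl
    (fun (st : PySem.Dict Char Int × List (List Char)) d =>
      if st.1.contains d && inter.contains d then
        (st.1, st.2 ++ [(inter.get? d).getD []])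
      else
        (st.1.insert d 1, st.2 ++ [[d]]))
    (PySem.Dict.mk [], [])
  let result := st.2.flatten   -- ''.join(trans)
  if isNeg then String.ofList ('-' :: result) else String.ofList result

-- ===== PORT B =====
-- str.partition for a one-character separator (PySem has no partition): split at the FIRST occurrence,
-- (s, '', '') when the separator is absent — exact for the single-character separators used here
def part3 (d : Char) : List Char → List Char × List Char × List Char
  | [] => ([], [], [])
  | c :: t => if c == d then ([], [d], t)
              else let r := part3 d t; (c :: r.1, r.2.1, r.2.2)

def transform_number_alt (num : String) : String :=
  let cs := num.toList
  let isNeg := PySem.List.pyGetD cs 0 ' ' == '-'   -- num[0] == '-' (same guard as A; "" is outside Pre_)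
  let s0 := if isNeg then PySem.List.slice cs (some 1) none else cs   -- num[1:]
  let s := inter.items.foldl
    (fun s (kv : Char × List Char) =>
      let p := part3 kv.1 s
      p.1 ++ p.2.1 ++ PySem.Chars.replace p.2.2 [kv.1] kv.2) s0
  if isNeg then String.ofList ('-' :: s) else String.ofList s

-- ===== PRECONDITION & SPEC =====
-- Pre_ excludes only the empty string, on which A (num[0]) raises IndexError.
def Pre_transform_number (num : String) : Prop := num.toList ≠ []
instance (num : String) : Decidable (Pre_transform_number num) := by unfold Pre_transform_number; infer_instance
def pvWitness_transform_number : String := "-1137x"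

def Spec_transform_number (num : String) (out : String) : Prop := out = transform_number_alt num
instance (num : String) (out : String) : Decidable (Spec_transform_number num out) := by unfold Spec_transform_number; infer_instance

-- ===== CLAIM (what is proved, stated in full; the proofs are below) =====
def Claim_equal_transform_number : Prop := ∀ (num : String), Dom_transform_number num → Pre_transform_number num → Spec_transform_number num (transform_number num)

-- ===== LEMMAS AND PROOFS =====

-- s.replace(d, w) for a single character d, as a flatMap
def repl (d : Char) (w : List Char) (s : List Char) : List Char :=
  s.flatMap (fun c => if c == d then w else [c])

lemma replace_go_single (d : Char) (w : List Char) :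
    ∀ (l : List Char) (fuel : Nat) (acc : List Char), l.length ≤ fuel →
      PySem.Chars.replace.go [d] w fuel l acc = acc.reverse ++ repl d w l := by
  intro l
  induction l with
  | nil => intro fuel acc _; cases fuel <;> simp [PySem.Chars.replace.go, repl]
  | cons c t ih =>
    intro fuel acc hle
    cases fuel with
    | zero => simp at hle
    | succ n =>
      by_cases hcd : c = d
      · subst hcd
        simp only [PySem.Chars.replace.go, List.isPrefixOf, beq_self_eq_true, Bool.true_and,
          if_true]
        rw [show List.drop [c].length (c :: t) = t from rfl]
        rw [ih _ _ (Nat.le_of_succ_le_succ hle)]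
        simp [repl]
      · have hpre : ([d].isPrefixOf (c :: t)) = false := by
          simp [List.isPrefixOf]; exact fun h => (hcd h.symm).elim
        simp only [PySem.Chars.replace.go, hpre, Bool.false_eq_true, if_false]
        rw [ih _ _ (Nat.le_of_succ_le_succ hle)]
        simp [repl, hcd]

lemma replace_single (s : List Char) (d : Char) (w : List Char) :
    PySem.Chars.replace s [d] w = repl d w s := by
  rw [PySem.Chars.replace]
  simpa using replace_go_single d w s s.length [] le_rfl

lemma repl_append (d : Char) (w p y : List Char) :
    repl d w (p ++ y) = repl d w p ++ repl d w y := by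
  simp [repl]

lemma repl_cons_self (d : Char) (w t : List Char) :
    repl d w (d :: t) = w ++ repl d w t := by
  simp [repl]

lemma repl_cons_ne {c d : Char} (h : c ≠ d) (w t : List Char) :
    repl d w (c :: t) = c :: repl d w t := by
  simp [repl, h]

lemma repl_of_not_mem {d : Char} {p : List Char} (h : d ∉ p) (w : List Char) :
    repl d w p = p := by
  induction p with
  | nil => rfl
  | cons c t ih =>
    have hcd : c ≠ d := fun hc => h (hc ▸ List.mem_cons_self)
    rw [repl_cons_ne hcd, ih (fun hm => h (List.mem_cons_of_mem _ hm))]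

-- one partition+replace pass of B
def gB (d : Char) (w : List Char) (s : List Char) : List Char :=
  let p := part3 d s
  p.1 ++ p.2.1 ++ PySem.Chars.replace p.2.2 [d] w

lemma gB_nil (d : Char) (w : List Char) : gB d w [] = [] := by
  simp [gB, part3, replace_single, repl]

lemma gB_cons_self (d : Char) (w t : List Char) :
    gB d w (d :: t) = d :: repl d w t := by
  simp [gB, part3, replace_single]

lemma gB_cons_ne {c d : Char} (h : c ≠ d) (w t : List Char) :
    gB d w (c :: t) = c :: gB d w t := by
  simp [gB, part3, h]

lemma gB_append {d : Char} {p : List Char} (h : d ∉ p) (w y : List Char) :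
    gB d w (p ++ y) = p ++ gB d w y := by
  induction p with
  | nil => rfl
  | cons c t ih =>
    have hcd : c ≠ d := fun hc => h (hc ▸ List.mem_cons_self)
    simp only [List.cons_append, gB_cons_ne hcd]
    rw [ih (fun hm => h (List.mem_cons_of_mem _ hm))]

-- B's loop, generalized with a set of already-seen digits
def Bfold (L : List (Char × List Char)) (seen : Char → Bool) (s : List Char) : List Char :=
  L.foldl (fun s kv => if seen kv.1 then repl kv.1 kv.2 s else gB kv.1 kv.2 s) s

lemma Bfold_cons_def (kv : Char × List Char) (L : List (Char × List Char))
    (seen : Char → Bool) (s : List Char) :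
    Bfold (kv :: L) seen s
      = Bfold L seen (if seen kv.1 = true then repl kv.1 kv.2 s else gB kv.1 kv.2 s) := rfl

lemma Bfold_nil (L : List (Char × List Char)) (seen : Char → Bool) :
    Bfold L seen [] = [] := by
  induction L with
  | nil => rfl
  | cons kv L' ih =>
    rw [Bfold_cons_def]
    by_cases h : seen kv.1 = true
    · rw [if_pos h, show repl kv.1 kv.2 [] = [] from rfl]; exact ih
    · rw [if_neg h, gB_nil]; exact ih

lemma Bfold_congr {L : List (Char × List Char)} {seen1 seen2 : Char → Bool}
    (h : ∀ kv ∈ L, seen1 kv.1 = seen2 kv.1) (s : List Char) :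
    Bfold L seen1 s = Bfold L seen2 s := by
  induction L generalizing s with
  | nil => rfl
  | cons kv L' ih =>
    rw [Bfold_cons_def, Bfold_cons_def, h kv List.mem_cons_self]
    exact ih (fun kv' hm => h kv' (List.mem_cons_of_mem _ hm)) _

lemma Bfold_append {L : List (Char × List Char)} {p : List Char}
    (h : ∀ kv ∈ L, kv.1 ∉ p) (seen : Char → Bool) (y : List Char) :
    Bfold L seen (p ++ y) = p ++ Bfold L seen y := by
  induction L generalizing y with
  | nil => rfl
  | cons kv L' ih =>
    have hk := h kv List.mem_cons_self
    have h' := fun kv' hm => h kv' (List.mem_cons_of_mem _ hm)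
    rw [Bfold_cons_def, Bfold_cons_def]
    by_cases hs : seen kv.1 = true
    · rw [if_pos hs, if_pos hs, repl_append, repl_of_not_mem hk]
      exact ih h' _
    · rw [if_neg hs, if_neg hs, gB_append hk]
      exact ih h' _

-- key step: one character of input against the whole list of digit passes
lemma Bfold_cons (L : List (Char × List Char))
    (hw : ∀ kv ∈ L, ∀ kv' ∈ L, kv'.1 ∉ kv.2)
    (hk : (L.map Prod.fst).Nodup)
    (seen : Char → Bool) (c : Char) (t : List Char) :
    Bfold L seen (c :: t) =
      (if seen c && (PySem.Dict.mk L).contains c then ((PySem.Dict.mk L).get? c).getD [] else [c])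
        ++ Bfold L (fun x => seen x || x == c) t := by
  induction L generalizing t with
  | nil => simp [Bfold]
  | cons kv L' ih =>
    obtain ⟨d, w⟩ := kv
    have hkd : d ∉ L'.map Prod.fst := by
      simpa using (List.nodup_cons.mp hk).1
    have hk' : (L'.map Prod.fst).Nodup := (List.nodup_cons.mp hk).2
    have hw' : ∀ kv ∈ L', ∀ kv' ∈ L', kv'.1 ∉ kv.2 :=
      fun kv hm kv' hm' => hw kv (List.mem_cons_of_mem _ hm) kv' (List.mem_cons_of_mem _ hm')
    have hnotkeys : ∀ kv' ∈ L', kv'.1 ≠ d := by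
      intro kv' hm he
      exact hkd (he ▸ List.mem_map_of_mem hm)
    rw [Bfold_cons_def, Bfold_cons_def]
    by_cases hdc : d = c
    · subst hdc
      have hcont : (PySem.Dict.mk ((d, w) :: L')).contains d = true := by
        simp [PySem.Dict.contains]
      have hget : ((PySem.Dict.mk ((d, w) :: L')).get? d) = some w := by
        simp [PySem.Dict.get?]
      have hwkeys : ∀ kv' ∈ L', kv'.1 ∉ w :=
        fun kv' hm => hw (d, w) List.mem_cons_self kv' (List.mem_cons_of_mem _ hm)
      have hcongr : ∀ kv' ∈ L', (fun x => seen x || x == d) kv'.1 = seen kv'.1 := by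
        intro kv' hm
        simp [hnotkeys kv' hm]
      have hseen' : ((fun x => seen x || x == d) d) = true := by simp
      rw [hcont, hget, if_pos hseen', Bool.and_true, Option.getD_some]
      have htail : Bfold L' (fun x => seen x || x == d) (repl d w t)
          = Bfold L' seen (repl d w t) := Bfold_congr hcongr _
      rw [htail]
      by_cases hs : seen d = true
      · rw [if_pos hs, if_pos hs, repl_cons_self]
        exact Bfold_append hwkeys seen (repl d w t)
      · rw [if_neg hs, if_neg (by simp [hs] : ¬ (seen d = true)), gB_cons_self]
        have hnotp : ∀ kv' ∈ L', kv'.1 ∉ [d] := by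
          intro kv' hm
          simp [hnotkeys kv' hm]
        exact Bfold_append hnotp seen (repl d w t)
    · have hdcb : (d == c) = false := by simp [hdc]
      have hstep : (if seen d = true then repl d w (c :: t) else gB d w (c :: t))
          = c :: (if seen d = true then repl d w t else gB d w t) := by
        by_cases hs : seen d = true
        · rw [if_pos hs, if_pos hs, repl_cons_ne (fun h => hdc h.symm)]
        · rw [if_neg hs, if_neg hs, gB_cons_ne (fun h => hdc h.symm)]
      rw [hstep, ih hw' hk' _]
      have hcont : (PySem.Dict.mk ((d, w) :: L')).contains c = (PySem.Dict.mk L').contains c := by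
        simp [PySem.Dict.contains, hdcb]
      have hget : (PySem.Dict.mk ((d, w) :: L')).get? c = (PySem.Dict.mk L').get? c := by
        rw [PySem.Dict.get?_mk_cons, if_neg (by simp [hdcb])]
      rw [hcont, hget]
      congr 1
      simp [hdcb]

-- the canonical per-character description (A's semantics)
def FF (seen : Char → Bool) : List Char → List (List Char)
  | [] => []
  | c :: t => (if seen c && inter.contains c then (inter.get? c).getD [] else [c])
      :: FF (fun x => seen x || x == c) t

lemma FF_congr {seen1 seen2 : Char → Bool} (h : ∀ c, seen1 c = seen2 c) :
    ∀ s, FF seen1 s = FF seen2 s := by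
  intro s
  induction s generalizing seen1 seen2 with
  | nil => rfl
  | cons c t ih =>
    simp only [FF, h c]
    congr 1
    exact ih (fun x => by rw [h x])

lemma inter_goodWords : ∀ kv ∈ inter.items, ∀ kv' ∈ inter.items, kv'.1 ∉ kv.2 := by decide
lemma inter_nodupKeys : (inter.items.map Prod.fst).Nodup := by decide

lemma B_main : ∀ (s : List Char) (seen : Char → Bool),
    Bfold inter.items seen s = (FF seen s).flatten := by
  intro s
  induction s with
  | nil => intro seen; rw [Bfold_nil]; rfl
  | cons c t ih =>
    intro seen
    rw [Bfold_cons inter.items inter_goodWords inter_nodupKeys seen c t]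
    simp only [FF, List.flatten_cons]
    rw [ih]

-- A's loop invariant
lemma A_main : ∀ (s : List Char) (dc : PySem.Dict Char Int) (trans : List (List Char)),
    (s.foldl
      (fun (st : PySem.Dict Char Int × List (List Char)) d =>
        if st.1.contains d && inter.contains d then
          (st.1, st.2 ++ [(inter.get? d).getD []])
        else
          (st.1.insert d 1, st.2 ++ [[d]]))
      (dc, trans)).2 = trans ++ FF (fun c => dc.contains c) s := by
  intro s
  induction s with
  | nil => intro dc trans; simp [FF]
  | cons c t ih =>
    intro dc trans
    by_cases hc : (dc.contains c && inter.contains c) = true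
    · simp only [List.foldl_cons, hc]
      rw [ih]
      have hdcc : dc.contains c = true := by
        revert hc; cases h : dc.contains c <;> simp
      simp only [FF, hc]
      rw [FF_congr (seen1 := fun x => dc.contains x || x == c) (seen2 := fun x => dc.contains x)
        (by intro x; by_cases hx : x = c
            · subst hx; simp [hdcc]
            · simp [hx]) t]
      simp
    · simp only [List.foldl_cons, hc, Bool.false_eq_true, if_false]
      rw [ih]
      simp only [FF, hc, Bool.false_eq_true, if_false]
      rw [FF_congr (seen1 := fun x => (dc.insert c 1).contains x)
        (seen2 := fun x => dc.contains x || x == c)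
        (by intro x
            show (dc.insert c 1).contains x = (dc.contains x || x == c)
            rw [PySem.Dict.contains_insert]
            exact Bool.or_comm _ _) t]
      simp

-- the two loop results agree, for any sign-stripped input s0
lemma core (s0 : List Char) :
    (s0.foldl
      (fun (st : PySem.Dict Char Int × List (List Char)) d =>
        if st.1.contains d && inter.contains d then
          (st.1, st.2 ++ [(inter.get? d).getD []])
        else
          (st.1.insert d 1, st.2 ++ [[d]]))
      (PySem.Dict.mk [], [])).2.flatten
    = inter.items.foldl
        (fun s (kv : Char × List Char) =>
          let p := part3 kv.1 s
          p.1 ++ p.2.1 ++ PySem.Chars.replace p.2.2 [kv.1] kv.2) s0 := by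
  rw [A_main s0 (PySem.Dict.mk []) []]
  have hB : inter.items.foldl
      (fun s (kv : Char × List Char) =>
        let p := part3 kv.1 s
        p.1 ++ p.2.1 ++ PySem.Chars.replace p.2.2 [kv.1] kv.2) s0
      = Bfold inter.items (fun _ => false) s0 := by
    unfold Bfold
    congr 1
  rw [hB, B_main s0 (fun _ => false)]
  exact rfl

-- ===== VERDICT (by name: the statement is the Claim_ definition above) =====
theorem transform_number_spec : Claim_equal_transform_number := by
  intro num _ _
  unfold Spec_transform_number transform_number transform_number_alt
  cases hneg : (PySem.List.pyGetD num.toList 0 ' ' == '-') with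
  | true =>
    simp only [hneg, if_true]
    exact congrArg (fun l => String.ofList ('-' :: l)) (core _)
  | false =>
    simp only [hneg, Bool.false_eq_true, if_false]
    exact congrArg String.ofList (core _)
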